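-- pv_equiv track=rewrite | github.com/louisaberdeen/adsb-rs | adsb_24_simple.py | spiral_from
-- ===== SOURCE A (Python) =====
-- def spiral_from(start: int, n: int) -> list[int]:
--     result = [start]
--     for delta in range(1, n):
--         if start - delta >= 0:
--             result.append(start - delta)
--         if start + delta < n:
--             result.append(start + delta)
--     return result
-- ===== SOURCE B (Python) =====
-- def spiral_from(start: int, n: int) -> list[int]:
--     lower = list(range(start - 1, max(-1, start - n), -1))
--     upper = list(range(start + 1, min(n, start + n)))
--     out = [start]
--     for lo, up in zip(lower, upper):
--         out.append(lo)
--         out.append(up)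
--     k = min(len(lower), len(upper))
--     out.extend(lower[k:])
--     out.extend(upper[k:])
--     return out
-- ===== Notes on version B (the rewrite author's own statement) =====
-- stated objective: alternative
-- what changed: B precomputes the two one-sided neighbor index ranges (lower, descending, truncated at max(-1,start-n); upper, ascending, truncated at min(n,start+n)) and interleaves them by zipping the common prefix and appending the leftover tail, instead of A's single delta scan with two inline bound checks.
import Mathlib
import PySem

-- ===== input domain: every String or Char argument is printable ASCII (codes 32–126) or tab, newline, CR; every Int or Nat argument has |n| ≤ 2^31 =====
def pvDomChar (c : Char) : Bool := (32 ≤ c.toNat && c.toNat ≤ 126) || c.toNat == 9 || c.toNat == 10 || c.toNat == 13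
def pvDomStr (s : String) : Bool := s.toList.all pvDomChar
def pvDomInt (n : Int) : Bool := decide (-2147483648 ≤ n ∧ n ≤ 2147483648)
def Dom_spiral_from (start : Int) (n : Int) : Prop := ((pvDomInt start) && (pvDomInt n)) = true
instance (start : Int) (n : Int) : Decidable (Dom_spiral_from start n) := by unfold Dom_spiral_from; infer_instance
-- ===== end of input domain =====

-- B builds the two one-sided neighbor ranges and interleaves them (zip + leftover tail)
-- instead of A's delta scan with inline bound checks; same O(n) cost, different decomposition.

-- ===== PORT A =====
def spiral_from (start : Int) (n : Int) : List Int :=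
  (PySem.List.pyRange 1 n 1).foldl
    (fun result delta =>
      let result := if start - delta ≥ 0 then result ++ [start - delta] else result
      if start + delta < n then result ++ [start + delta] else result)
    [start]

-- ===== PORT B =====
def spiral_from_alt (start : Int) (n : Int) : List Int :=
  let lower := PySem.List.pyRange (start - 1) (max (-1) (start - n)) (-1)
  let upper := PySem.List.pyRange (start + 1) (min n (start + n)) 1
  let out := (lower.zip upper).foldl (fun out p => (out ++ [p.1]) ++ [p.2]) [start]
  let k := min lower.length upper.length
  (out ++ lower.drop k) ++ upper.drop k

-- ===== PRECONDITION & SPEC =====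
def Spec_spiral_from (start : Int) (n : Int) (out : List Int) : Prop := out = spiral_from_alt start n
instance (start : Int) (n : Int) (out : List Int) : Decidable (Spec_spiral_from start n out) := by unfold Spec_spiral_from; infer_instance

-- ===== CLAIM (what is proved, stated in full; the proofs are below) =====
def Claim_equal_spiral_from : Prop := ∀ (start : Int) (n : Int), Dom_spiral_from start n → Spec_spiral_from start n (spiral_from start n)

-- ===== LEMMAS AND PROOFS =====

-- proof-only helper: the interleaving of two lists (lock-step, then the leftover tail)
def pvMerge2 : List Int → List Int → List Int
  | [], us => us
  | ls, [] => ls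
  | l :: ls, u :: us => l :: u :: pvMerge2 ls us

lemma pvMerge2_nil_right (ls : List Int) : pvMerge2 ls [] = ls := by
  cases ls <;> rfl

-- B's zip-then-tails computation is pvMerge2
lemma pvZipTail_eq_merge2 (ls us : List Int) (acc : List Int) :
    ((ls.zip us).foldl (fun out p => (out ++ [p.1]) ++ [p.2]) acc
      ++ ls.drop (min ls.length us.length)) ++ us.drop (min ls.length us.length)
      = acc ++ pvMerge2 ls us := by
  induction ls generalizing us acc with
  | nil => simp [pvMerge2]
  | cons l ls ih =>
    cases us with
    | nil => simp [pvMerge2_nil_right]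
    | cons u us =>
      simp only [List.zip_cons_cons, List.foldl_cons, List.length_cons]
      have : min (ls.length + 1) (us.length + 1) = min ls.length us.length + 1 := by omega
      rw [this]
      simp only [List.drop_succ_cons]
      rw [ih us ((acc ++ [l]) ++ [u])]
      simp [pvMerge2]

-- A's loop, started at delta = d, appends pvMerge2 of the two remaining one-sided ranges
-- A's loop, started at delta = d, appends pvMerge2 of the two remaining one-sided ranges
lemma pvLoop_eq (start n : Int) : ∀ (m : Nat) (d : Int) (acc : List Int), (n - d).toNat = m →
    (PySem.List.pyRange d n 1).foldl
      (fun result delta =>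
        let result := if start - delta ≥ 0 then result ++ [start - delta] else result
        if start + delta < n then result ++ [start + delta] else result)
      acc
    = acc ++ pvMerge2 (PySem.List.pyRange (start - d) (max (-1) (start - n)) (-1))
                      (PySem.List.pyRange (start + d) (min n (start + n)) 1) := by
  intro m
  induction m with
  | zero =>
    intro d acc hm
    have hnd : n ≤ d := by omega
    rw [PySem.List.pyRange_one_eq_nil hnd,
        PySem.List.pyRange_neg_one_eq_nil (le_trans (by omega) (le_max_right (-1) (start - n))),
        PySem.List.pyRange_one_eq_nil (le_trans (min_le_right n (start + n)) (by omega))]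
    simp [pvMerge2]
  | succ m ih =>
    intro d acc hm
    have hdn : d < n := by omega
    rw [PySem.List.pyRange_one_cons hdn]
    simp only [List.foldl_cons]
    rw [ih (d + 1) _ (by omega)]
    have e1 : start - (d + 1) = start - d - 1 := by ring
    have e2 : start + (d + 1) = start + d + 1 := by ring
    rw [e1, e2]
    by_cases c1 : start - d ≥ 0 <;> by_cases c2 : start + d < n
    · conv_rhs => rw [PySem.List.pyRange_neg_one_cons (max_lt (by omega) (by omega)),
                      PySem.List.pyRange_one_cons (lt_min c2 (by omega))]
      have hds : d ≤ start := by omega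
      simp [hds, c2, pvMerge2]
    · conv_rhs => rw [PySem.List.pyRange_one_eq_nil (le_trans (min_le_left n (start + n)) (by omega)),
                      PySem.List.pyRange_neg_one_cons (max_lt (by omega) (by omega))]
      rw [PySem.List.pyRange_one_eq_nil (le_trans (min_le_left n (start + n)) (by omega))]
      have hds : d ≤ start := by omega
      simp [hds, c2, pvMerge2_nil_right, pvMerge2]
    · conv_rhs => rw [PySem.List.pyRange_neg_one_eq_nil (le_trans (by omega) (le_max_left (-1) (start - n))),
                      PySem.List.pyRange_one_cons (lt_min c2 (by omega))]
      rw [PySem.List.pyRange_neg_one_eq_nil (le_trans (by omega) (le_max_left (-1) (start - n)))]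
      have hds : ¬ d ≤ start := by omega
      simp [hds, c2, pvMerge2]
    · conv_rhs => rw [PySem.List.pyRange_neg_one_eq_nil (le_trans (by omega) (le_max_left (-1) (start - n))),
                      PySem.List.pyRange_one_eq_nil (le_trans (min_le_left n (start + n)) (by omega))]
      rw [PySem.List.pyRange_neg_one_eq_nil (le_trans (by omega) (le_max_left (-1) (start - n))),
          PySem.List.pyRange_one_eq_nil (le_trans (min_le_left n (start + n)) (by omega))]
      have hds : ¬ d ≤ start := by omega
      simp [hds, c2, pvMerge2]

-- ===== VERDICT (by name: the statement is the Claim_ definition above) =====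
theorem spiral_from_spec : Claim_equal_spiral_from := by
  intro start n _
  unfold Spec_spiral_from spiral_from spiral_from_alt
  rw [pvLoop_eq start n (n - 1).toNat 1 [start] rfl]
  rw [← pvZipTail_eq_merge2]
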